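-- pv_equiv track=rewrite | github.com/Coaxecva/COMP4030-Design-and-Analysis-of-Algorithms | Fall2017/hw-sol/hw1/mtcskwsk.py | recursive_half
-- ===== SOURCE A (Python) =====
-- def scale(A, B):
-- 	if sum(A)==sum(B):
-- 		return 0
-- 	elif sum(A) < sum(B):
-- 		return -1
-- 	else:
-- 		return 1
--
-- def split(list, split):
-- 	# Splits the array into two, equal-sized arrays
-- 	if split == 2:
-- 		half = len(list)/2
-- 		return list[:int(half)], list[int(half):]
-- 	# Splits the array into three, equal-sized arrays
-- 	elif split == 3:
-- 		first_third = len(list)/3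
-- 		second_third = 2*len(list)/3
-- 		return list[:int(first_third)], list[int(first_third):int(second_third)], list[int(second_third):]
--
-- def recursive_half(coinList):
--
-- 	# If the list is even length, split it in half
-- 	if len(coinList)%2 == 0:
-- 		A = split(coinList, 2)[0]
-- 		B = split(coinList, 2)[1]
--
-- 	# Odd length lists have last element removed before being split
-- 	else:
-- 		oddCoin = coinList[len(coinList)-1]
-- 		coinList = coinList[:len(coinList)-1]
-- 		A = split(coinList, 2)[0]
-- 		B = split(coinList, 2)[1]
--
-- 	# check if removed item is the fake coin
-- 	if scale(A,B) == 0: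
-- 		return oddCoin
--
-- 	# If A is lighter than B
-- 	elif scale(A,B) == -1:
-- 		return recursive_half(A)
--
-- 	# If B is lighter than A
-- 	elif scale(A,B) == 1:
-- 		return recursive_half(B)
-- ===== SOURCE B (Python) =====
-- def _step(cur):
--     # One halving pass: returns (True, answer) or (False, lighter half).
--     # oddCoin is local here, so a balanced even-length list raises
--     # UnboundLocalError, as in the original.
--     if len(cur) % 2:
--         oddCoin = cur[-1]
--         cur = cur[:-1]
--     mid = len(cur) // 2
--     a, b = cur[:mid], cur[mid:]
--     sa, sb = sum(a), sum(b)
--     if sa == sb: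
--         return True, oddCoin
--     return False, a if sa < sb else b
--
--
-- def recursive_half(coinList):
--     done, val = _step(coinList)
--     while not done:
--         done, val = _step(val)
--     return val
-- ===== Notes on version B (the rewrite author's own statement) =====
-- stated objective: alternative
-- what changed: Recursive halving replaced by an iterative while-loop driver over a single-pass step helper: one split/compare per level (A calls split twice and re-sums per call), the loop carrying the lighter half; the per-iteration local oddCoin preserves the original's UnboundLocalError on balanced even-length lists (excluded by Pre_).
import Mathlib
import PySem

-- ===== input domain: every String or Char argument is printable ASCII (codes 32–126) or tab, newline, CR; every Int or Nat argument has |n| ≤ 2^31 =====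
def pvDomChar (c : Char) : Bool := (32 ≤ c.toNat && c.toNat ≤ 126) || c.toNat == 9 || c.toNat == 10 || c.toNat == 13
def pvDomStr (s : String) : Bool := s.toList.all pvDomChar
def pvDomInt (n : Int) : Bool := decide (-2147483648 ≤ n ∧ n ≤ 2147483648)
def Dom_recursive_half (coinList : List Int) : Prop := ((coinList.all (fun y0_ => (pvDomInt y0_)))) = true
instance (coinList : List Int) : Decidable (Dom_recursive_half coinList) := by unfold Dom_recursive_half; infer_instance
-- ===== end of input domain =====

-- B replaces the recursive halving by an iterative driver over a one-split step helper (alternative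
-- decomposition, same cost); equivalence is about the RETURN value on Pre_ (where Python A returns at all).

-- ===== PORT A =====

-- scale(A, B)
def pvScale (A B : List Int) : Int :=
  if A.sum == B.sum then 0
  else if A.sum < B.sum then -1
  else 1

-- split(list, 2); the split == 3 branch of the Python helper is never called in this program.
-- half = len(list)/2 is a float in Python 3; int(half) on a nonnegative length is Nat division.
def pvSplit2 (l : List Int) : List Int × List Int :=
  let half : Nat := l.length / 2
  (PySem.List.slice l none (some (half : Int)), PySem.List.slice l (some (half : Int)) none)

theorem pvSplit2_eq (l : List Int) :
    pvSplit2 l = (l.take (l.length / 2), l.drop (l.length / 2)) := by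
  simp only [pvSplit2]
  rw [PySem.List.slice_to_natCast, PySem.List.slice_from_natCast]

-- cited by recursive_half's decreasing_by: an even split with unequal half-sums is nonempty
theorem pvScale_ne_zero_len (l : List Int)
    (h : ¬ (pvScale (pvSplit2 l).1 (pvSplit2 l).2 == 0) = true) : l.length ≠ 0 := by
  intro h0
  rw [List.eq_nil_of_length_eq_zero h0] at h
  exact h (by decide)

def recursive_half (coinList : List Int) : Int :=
  if hpar : coinList.length % 2 == 0 then
    let A := (pvSplit2 coinList).1
    let B := (pvSplit2 coinList).2
    if h0 : pvScale A B == 0 then 0   -- Python: UnboundLocalError (oddCoin unbound); outside Pre_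
    else if h1 : pvScale A B == -1 then recursive_half A
    else recursive_half B
  else
    let oddCoin := PySem.List.pyGetD coinList ((coinList.length : Int) - 1) 0
    let rest := PySem.List.slice coinList none (some ((coinList.length : Int) - 1))
    let A := (pvSplit2 rest).1
    let B := (pvSplit2 rest).2
    if h0 : pvScale A B == 0 then oddCoin
    else if h1 : pvScale A B == -1 then recursive_half A
    else recursive_half B
termination_by coinList.length
decreasing_by
  · -- even, first half
    have hne := pvScale_ne_zero_len coinList h0
    simp only [A, pvSplit2_eq]
    simp; omega
  · -- even, second half
    have hne := pvScale_ne_zero_len coinList h0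
    simp only [B, pvSplit2_eq]
    simp at hpar
    simp; omega
  · -- odd, first half
    simp at hpar
    have hc : ((coinList.length : Int) - 1) = ((coinList.length - 1 : Nat) : Int) := by omega
    simp only [A, rest, pvSplit2_eq]
    rw [hc, PySem.List.slice_to_natCast]
    simp; omega
  · -- odd, second half
    simp at hpar
    have hc : ((coinList.length : Int) - 1) = ((coinList.length - 1 : Nat) : Int) := by omega
    simp only [B, rest, pvSplit2_eq]
    rw [hc, PySem.List.slice_to_natCast]
    simp; omega

-- ===== PORT B =====

-- _step(cur): one halving pass; (a.sum == b.sum) with no odd coin is Python's UnboundLocalError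
-- (modelled by .getD 0, reached only outside Pre_).
def pvStep (cur : List Int) : Int ⊕ List Int :=
  let p : Option Int × List Int :=
    if cur.length % 2 == 1 then
      (some (PySem.List.pyGetD cur (-1) 0), PySem.List.slice cur none (some (-1)))
    else (none, cur)
  let mid : Nat := p.2.length / 2
  let a := PySem.List.slice p.2 none (some (mid : Int))
  let b := PySem.List.slice p.2 (some (mid : Int)) none
  if a.sum == b.sum then Sum.inl (p.1.getD 0)
  else Sum.inr (if a.sum < b.sum then a else b)

theorem pvStep_even (cur : List Int) (h : cur.length % 2 = 0) :
    pvStep cur =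
      (if (cur.take (cur.length / 2)).sum == (cur.drop (cur.length / 2)).sum then Sum.inl 0
       else Sum.inr (if (cur.take (cur.length / 2)).sum < (cur.drop (cur.length / 2)).sum
                     then cur.take (cur.length / 2) else cur.drop (cur.length / 2))) := by
  simp only [pvStep, h]
  rw [PySem.List.slice_to_natCast, PySem.List.slice_from_natCast]
  simp

theorem pvStep_odd (cur : List Int) (h : cur.length % 2 = 1) :
    pvStep cur =
      (let m := cur.dropLast
       if (m.take (m.length / 2)).sum == (m.drop (m.length / 2)).sum then
         Sum.inl (PySem.List.pyGetD cur (-1) 0)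
       else Sum.inr (if (m.take (m.length / 2)).sum < (m.drop (m.length / 2)).sum
                     then m.take (m.length / 2) else m.drop (m.length / 2))) := by
  simp only [pvStep, h]
  rw [PySem.List.slice_to_neg_one, PySem.List.slice_to_natCast, PySem.List.slice_from_natCast]
  simp

theorem pvStep_inr_lt (cur nxt : List Int) (h : pvStep cur = Sum.inr nxt) :
    nxt.length < cur.length := by
  rcases Nat.mod_two_eq_zero_or_one cur.length with hp | hp
  · rw [pvStep_even cur hp] at h
    split at h
    · exact absurd h (by simp)
    · rename_i hne
      have hlen : cur.length ≠ 0 := by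
        intro h0
        rw [List.eq_nil_of_length_eq_zero h0] at hne
        simp at hne
      injection h with h
      subst h
      split <;> simp <;> omega
  · rw [pvStep_odd cur hp] at h
    simp only at h
    split at h
    · exact absurd h (by simp)
    · injection h with h
      subst h
      split <;> simp <;> omega

def recursive_half_alt (coinList : List Int) : Int :=
  match h : pvStep coinList with
  | Sum.inl v => v
  | Sum.inr nxt => recursive_half_alt nxt
termination_by coinList.length
decreasing_by exact pvStep_inr_lt _ _ h

-- ===== PRECONDITION & SPEC =====

-- Whether Python A returns normally is inherently path-dependent (it raises UnboundLocalError exactly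
-- when the halving path reaches an even-length list whose two half-sums balance); pvNoRaise is exactly
-- that condition on the input, nothing narrower.
def pvNoRaise (fuel : Nat) (l : List Int) : Bool :=
  match fuel with
  | 0 => false
  | fuel + 1 =>
    if l.length % 2 == 0 then
      let a := l.take (l.length / 2)
      let b := l.drop (l.length / 2)
      if a.sum == b.sum then false
      else if a.sum < b.sum then pvNoRaise fuel a else pvNoRaise fuel b
    else
      let l' := l.dropLast
      let a := l'.take (l'.length / 2)
      let b := l'.drop (l'.length / 2)
      if a.sum == b.sum then true
      else if a.sum < b.sum then pvNoRaise fuel a else pvNoRaise fuel b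

-- Pre_ excludes exactly the inputs on which Python A raises UnboundLocalError (the halving path reaches
-- an even-length list whose halves balance); A returns on every input Pre_ admits.
def Pre_recursive_half (coinList : List Int) : Prop := pvNoRaise coinList.length coinList = true
instance (coinList : List Int) : Decidable (Pre_recursive_half coinList) := by
  unfold Pre_recursive_half; infer_instance

def pvWitness_recursive_half : List Int := [2, 1]

def Spec_recursive_half (coinList : List Int) (out : Int) : Prop := out = recursive_half_alt coinList
instance (coinList : List Int) (out : Int) : Decidable (Spec_recursive_half coinList out) := by
  unfold Spec_recursive_half; infer_instance

-- ===== CLAIM (what is proved, stated in full; the proofs are below) =====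
def Claim_equal_recursive_half : Prop := ∀ (coinList : List Int), Dom_recursive_half coinList → Pre_recursive_half coinList → Spec_recursive_half coinList (recursive_half coinList)

-- ===== LEMMAS AND PROOFS =====

theorem pvScale_beq_zero (A B : List Int) : (pvScale A B == 0) = (A.sum == B.sum) := by
  simp only [pvScale]
  split_ifs <;> simp_all

theorem pvScale_beq_negone (A B : List Int) :
    (pvScale A B == -1) = (decide (¬ A.sum = B.sum) && decide (A.sum < B.sum)) := by
  simp only [pvScale]
  split_ifs <;> simp_all

theorem recA_even (l : List Int) (h : l.length % 2 = 0) :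
    recursive_half l =
      (if (l.take (l.length / 2)).sum == (l.drop (l.length / 2)).sum then 0
       else if (l.take (l.length / 2)).sum < (l.drop (l.length / 2)).sum then
         recursive_half (l.take (l.length / 2))
       else recursive_half (l.drop (l.length / 2))) := by
  rw [recursive_half]
  simp only [pvSplit2_eq, pvScale_beq_zero, pvScale_beq_negone, h]
  simp only [dite_eq_ite, beq_iff_eq, Bool.and_eq_true, decide_eq_true_eq]
  split_ifs <;> try rfl
  all_goals first | contradiction | (exfalso; linarith) | simp_all

theorem recA_odd (l : List Int) (h : l.length % 2 = 1) :
    recursive_half l =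
      (let m := l.dropLast
       if (m.take (m.length / 2)).sum == (m.drop (m.length / 2)).sum then
         PySem.List.pyGetD l ((l.length : Int) - 1) 0
       else if (m.take (m.length / 2)).sum < (m.drop (m.length / 2)).sum then
         recursive_half (m.take (m.length / 2))
       else recursive_half (m.drop (m.length / 2))) := by
  rw [recursive_half]
  have hc : ((l.length : Int) - 1) = ((l.length - 1 : Nat) : Int) := by omega
  simp only [hc, PySem.List.slice_to_natCast,
    pvSplit2_eq, pvScale_beq_zero, pvScale_beq_negone, h]
  simp only [dite_eq_ite, beq_iff_eq, Bool.and_eq_true, decide_eq_true_eq,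
    List.dropLast_eq_take, List.length_take, Nat.min_eq_left (Nat.sub_le l.length 1)]
  split_ifs <;> try rfl
  all_goals first | contradiction | (exfalso; linarith) | tauto | simp_all

theorem noRaise_even (fuel : Nat) (l : List Int) (h : l.length % 2 = 0) :
    pvNoRaise (fuel + 1) l =
      (if (l.take (l.length / 2)).sum == (l.drop (l.length / 2)).sum then false
       else if (l.take (l.length / 2)).sum < (l.drop (l.length / 2)).sum then
         pvNoRaise fuel (l.take (l.length / 2))
       else pvNoRaise fuel (l.drop (l.length / 2))) := by
  rw [pvNoRaise]
  simp [h]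

theorem noRaise_odd (fuel : Nat) (l : List Int) (h : l.length % 2 = 1) :
    pvNoRaise (fuel + 1) l =
      (let m := l.dropLast
       if (m.take (m.length / 2)).sum == (m.drop (m.length / 2)).sum then true
       else if (m.take (m.length / 2)).sum < (m.drop (m.length / 2)).sum then
         pvNoRaise fuel (m.take (m.length / 2))
       else pvNoRaise fuel (m.drop (m.length / 2))) := by
  rw [pvNoRaise]
  simp [h]

theorem alt_inl (l : List Int) (v : Int) (hstep : pvStep l = Sum.inl v) :
    recursive_half_alt l = v := by
  rw [recursive_half_alt]
  split
  · rename_i v' h; rw [hstep] at h; injection h with h; exact h.symm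
  · rename_i nxt h; rw [hstep] at h; cases h

theorem alt_inr (l nxt : List Int) (hstep : pvStep l = Sum.inr nxt) :
    recursive_half_alt l = recursive_half_alt nxt := by
  rw [recursive_half_alt]
  split
  · rename_i v' h; rw [hstep] at h; cases h
  · rename_i nxt' h; rw [hstep] at h; injection h with h; rw [h]

-- A's odd-branch coinList[len-1] and B's cur[-1] are the same last element.
theorem pyGetD_last_eq (l : List Int) (h : l.length % 2 = 1) :
    PySem.List.pyGetD l ((l.length : Int) - 1) 0 = PySem.List.pyGetD l (-1) 0 := by
  have hne : l ≠ [] := by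
    intro h0; subst h0; simp at h
  rw [PySem.List.pyGetD_neg_one _ _ hne]
  have hc : ((l.length : Int) - 1) = ((l.length - 1 : Nat) : Int) := by omega
  rw [hc, PySem.List.pyGetD_natCast]
  rw [List.getLast_eq_getElem]
  exact List.getD_eq_getElem l 0 (by omega)

theorem pv_main : ∀ (fuel : Nat) (l : List Int), l.length ≤ fuel → pvNoRaise fuel l = true →
    recursive_half l = recursive_half_alt l := by
  intro fuel
  induction fuel with
  | zero =>
    intro l hl hnr
    rw [pvNoRaise] at hnr
    cases hnr
  | succ n ih =>
    intro l hl hnr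
    rcases Nat.mod_two_eq_zero_or_one l.length with hp | hp
    · -- even length
      have hne : l.length ≠ 0 := by
        intro h0
        have hnil : l = [] := List.eq_nil_of_length_eq_zero h0
        subst hnil
        simp [noRaise_even n ([] : List Int) (by simp)] at hnr
      rw [noRaise_even n l hp] at hnr
      rw [recA_even l hp]
      by_cases h1 : (l.take (l.length / 2)).sum = (l.drop (l.length / 2)).sum
      · rw [if_pos (by simp [h1])] at hnr
        cases hnr
      · rw [if_neg (by simp [h1])] at hnr
        rw [if_neg (by simp [h1])]
        by_cases h2 : (l.take (l.length / 2)).sum < (l.drop (l.length / 2)).sum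
        · rw [if_pos (by simp [h2])] at hnr ⊢
          have hstep : pvStep l = Sum.inr (l.take (l.length / 2)) := by
            rw [pvStep_even l hp, if_neg (by simp [h1]), if_pos (by simp [h2])]
          rw [alt_inr l _ hstep]
          exact ih _ (by simp; omega) hnr
        · rw [if_neg (by simp [h2])] at hnr ⊢
          have hstep : pvStep l = Sum.inr (l.drop (l.length / 2)) := by
            rw [pvStep_even l hp, if_neg (by simp [h1]), if_neg (by simp [h2])]
          rw [alt_inr l _ hstep]
          exact ih _ (by simp; omega) hnr
    · -- odd length
      rw [noRaise_odd n l hp] at hnr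
      rw [recA_odd l hp]
      simp only [List.length_dropLast] at hnr ⊢
      by_cases h1 : (l.dropLast.take ((l.length - 1) / 2)).sum
          = (l.dropLast.drop ((l.length - 1) / 2)).sum
      · rw [if_pos (by simp [h1])]
        have hstep : pvStep l = Sum.inl (PySem.List.pyGetD l (-1) 0) := by
          rw [pvStep_odd l hp]
          simp only [List.length_dropLast]
          rw [if_pos (by simp [h1])]
        rw [alt_inl l _ hstep]
        exact pyGetD_last_eq l hp
      · rw [if_neg (by simp [h1])] at hnr ⊢
        by_cases h2 : (l.dropLast.take ((l.length - 1) / 2)).sum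
            < (l.dropLast.drop ((l.length - 1) / 2)).sum
        · rw [if_pos (by simp [h2])] at hnr ⊢
          have hstep : pvStep l = Sum.inr (l.dropLast.take ((l.length - 1) / 2)) := by
            rw [pvStep_odd l hp]
            simp only [List.length_dropLast]
            rw [if_neg (by simp [h1]), if_pos (by simp [h2])]
          rw [alt_inr l _ hstep]
          exact ih _ (by simp; omega) hnr
        · rw [if_neg (by simp [h2])] at hnr ⊢
          have hstep : pvStep l = Sum.inr (l.dropLast.drop ((l.length - 1) / 2)) := by
            rw [pvStep_odd l hp]
            simp only [List.length_dropLast]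
            rw [if_neg (by simp [h1]), if_neg (by simp [h2])]
          rw [alt_inr l _ hstep]
          exact ih _ (by simp; omega) hnr

-- ===== VERDICT (by name: the statement is the Claim_ definition above) =====
theorem recursive_half_spec : Claim_equal_recursive_half := by
  intro l _ hpre
  unfold Spec_recursive_half
  exact pv_main l.length l le_rfl hpre
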